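-- pv_equiv track=rewrite | github.com/danieljktan/EightPuzzle | main.py | valid_board
-- ===== SOURCE A (Python) =====
-- def valid_board(board):
--    nums = set()
--    for row in board:
--       for b in row:
--          if b < 0 or b >= 9: #invalid number
--             return False
--          if b not in nums:
--             nums.add(b)
--          else:
--             return False
--    return True
-- ===== SOURCE B (Python) =====
-- def valid_board(board):
--     flat = sorted(b for row in board for b in row)
--     if not flat:
--         return True
--     if flat[0] < 0 or flat[-1] >= 9:
--         return False
--     return all(x < y for x, y in zip(flat, flat[1:]))
-- ===== Notes on version B (the rewrite author's own statement) =====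
-- stated objective: alternative
-- what changed: Replaces the running-hash-set early-exit scan by sort-then-scan: sort the flattened cells, read the range check off the two endpoints of the sorted list, and test distinctness as strict increase between adjacent elements.
import Mathlib
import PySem

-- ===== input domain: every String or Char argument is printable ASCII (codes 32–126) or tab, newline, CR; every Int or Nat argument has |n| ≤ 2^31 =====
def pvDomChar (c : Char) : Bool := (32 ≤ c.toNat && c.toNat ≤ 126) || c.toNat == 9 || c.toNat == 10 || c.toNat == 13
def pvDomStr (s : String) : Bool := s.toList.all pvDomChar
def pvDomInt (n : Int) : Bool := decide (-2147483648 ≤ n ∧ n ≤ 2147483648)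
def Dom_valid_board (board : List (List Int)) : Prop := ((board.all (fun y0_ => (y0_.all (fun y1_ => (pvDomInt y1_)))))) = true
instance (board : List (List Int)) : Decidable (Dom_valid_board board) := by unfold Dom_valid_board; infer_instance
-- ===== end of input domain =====

-- B replaces A's running-hash-set early-exit scan by sort-then-scan: sort the flattened cells,
-- read the range check off the endpoints of the sorted list, and test distinctness as strict
-- adjacent increase; a genuinely different algorithm of similar cost.

-- ===== PORT A =====
-- inner 'for b in row' loop; 'none' = the Python 'return False', 'some nums' = loop finished
def vbRowLoop : List Int → PySem.Set Int → Option (PySem.Set Int)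
  | [], nums => some nums
  | b :: rest, nums =>
    if b < 0 ∨ 9 ≤ b then none
    else if !(PySem.Set.contains nums b) then vbRowLoop rest (PySem.Set.add nums b)
    else none

-- outer 'for row in board' loop
def vbBoardLoop : List (List Int) → PySem.Set Int → Option (PySem.Set Int)
  | [], nums => some nums
  | row :: rest, nums =>
    match vbRowLoop row nums with
    | none => none
    | some nums' => vbBoardLoop rest nums'

def valid_board (board : List (List Int)) : Bool :=
  (vbBoardLoop board PySem.Set.empty).isSome

-- ===== PORT B =====
-- flat = sorted(b for row in board for b in row); empty → True; flat[0] / flat[-1] endpoint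
-- range check (getLastD is exact for flat[-1]: the branch is reached only when flat is nonempty);
-- then all(x < y for x, y in zip(flat, flat[1:]))
def valid_board_alt (board : List (List Int)) : Bool :=
  let flat := PySem.List.sorted (board.flatMap (fun row => row)) (fun x => x) false
  if flat.isEmpty then true
  else if decide (flat.headD 0 < 0) || decide (9 ≤ flat.getLastD 0) then false
  else (flat.zip flat.tail).all (fun p => decide (p.1 < p.2))

-- ===== PRECONDITION & SPEC =====
def Spec_valid_board (board : List (List Int)) (out : Bool) : Prop := out = valid_board_alt board
instance (board : List (List Int)) (out : Bool) : Decidable (Spec_valid_board board out) := by unfold Spec_valid_board; infer_instance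

-- ===== CLAIM =====
def Claim_equal_valid_board : Prop := ∀ (board : List (List Int)), Dom_valid_board board → Spec_valid_board board (valid_board board)

-- ===== LEMMAS AND PROOFS =====

-- A's inner loop succeeds iff the row is in-range, duplicate-free and disjoint from the set so far.
theorem vbRowLoop_eq (row : List Int) (s : PySem.Set Int) :
    vbRowLoop row s =
      if (∀ b ∈ row, 0 ≤ b ∧ b < 9) ∧ row.Nodup ∧ (∀ b ∈ row, b ∉ s)
      then some (row.foldl PySem.Set.add s) else none := by
  induction row generalizing s with
  | nil => simp [vbRowLoop]
  | cons b rest ih =>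
    simp only [vbRowLoop, ih]
    by_cases hb : b < 0 ∨ 9 ≤ b
    · rw [if_pos hb, if_neg (by rintro ⟨hall, -, -⟩; have := hall b (by simp); omega)]
    · rw [if_neg hb]
      by_cases hbs : b ∈ s
      · have hc : PySem.Set.contains s b = true := by simp [hbs]
        simp only [hc, Bool.not_true]
        rw [if_neg (by simp), if_neg (by rintro ⟨-, -, h3⟩; exact h3 b (by simp) hbs)]
      · have hc : PySem.Set.contains s b = false := by simp [hbs]
        simp only [hc, Bool.not_false, if_pos]
        have hadd : PySem.Set.add s b = s ++ [b] := by simp [PySem.Set.add, hbs]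
        have hiff : ((∀ x ∈ rest, 0 ≤ x ∧ x < 9) ∧ rest.Nodup ∧ (∀ x ∈ rest, x ∉ PySem.Set.add s b)) ↔
            ((∀ x ∈ b :: rest, 0 ≤ x ∧ x < 9) ∧ (b :: rest).Nodup ∧ (∀ x ∈ b :: rest, x ∉ s)) := by
          rw [hadd]
          simp only [List.forall_mem_cons, List.nodup_cons, List.mem_append, List.mem_singleton]
          constructor
          · rintro ⟨h1, h2, h3⟩
            exact ⟨⟨⟨by omega, by omega⟩, h1⟩, ⟨fun hm => (h3 b hm) (Or.inr rfl), h2⟩, hbs,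
              fun x hx hxs => h3 x hx (Or.inl hxs)⟩
          · rintro ⟨⟨-, h1⟩, ⟨hbr, h2⟩, hbs', h3⟩
            refine ⟨h1, h2, fun x hx h => ?_⟩
            rcases h with h | rfl
            · exact h3 x hx h
            · exact hbr hx
        rw [List.foldl_cons, if_congr hiff rfl rfl]

-- A succeeds iff the flattened board is in-range, duplicate-free and disjoint from the initial set.
theorem vbBoardLoop_eq (rows : List (List Int)) (s : PySem.Set Int) :
    vbBoardLoop rows s =
      (if (∀ b ∈ rows.flatMap (fun r => r), 0 ≤ b ∧ b < 9) ∧ (rows.flatMap (fun r => r)).Nodup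
          ∧ (∀ b ∈ rows.flatMap (fun r => r), b ∉ s)
       then some ((rows.flatMap (fun r => r)).foldl PySem.Set.add s) else none) := by
  induction rows generalizing s with
  | nil => simp [vbBoardLoop]
  | cons row rest ih =>
    simp only [vbBoardLoop, vbRowLoop_eq, List.flatMap_cons]
    by_cases hrow : (∀ b ∈ row, 0 ≤ b ∧ b < 9) ∧ row.Nodup ∧ (∀ b ∈ row, b ∉ s)
    · rw [if_pos hrow]
      simp only [ih]
      have hmem : ∀ (xs : List Int) (t : PySem.Set Int) (x : Int),
          x ∈ xs.foldl PySem.Set.add t ↔ x ∈ t ∨ x ∈ xs := by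
        intro xs
        induction xs with
        | nil => simp
        | cons a r ihr => intro t x; simp [ihr, PySem.Set.mem_add]; tauto
      have hiff : ((∀ b ∈ rest.flatMap (fun r => r), 0 ≤ b ∧ b < 9) ∧ (rest.flatMap (fun r => r)).Nodup
            ∧ (∀ b ∈ rest.flatMap (fun r => r), b ∉ row.foldl PySem.Set.add s)) ↔
          ((∀ b ∈ row ++ rest.flatMap (fun r => r), 0 ≤ b ∧ b < 9) ∧ (row ++ rest.flatMap (fun r => r)).Nodup
            ∧ (∀ b ∈ row ++ rest.flatMap (fun r => r), b ∉ s)) := by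
        obtain ⟨h1, h2, h3⟩ := hrow
        simp only [List.forall_mem_append, List.nodup_append, hmem]
        constructor
        · rintro ⟨g1, g2, g3⟩
          refine ⟨⟨h1, g1⟩, ⟨h2, g2, fun a hav b hbf e => (g3 b hbf) (Or.inr (e ▸ hav))⟩,
            h3, fun x hx hxs => (g3 x hx) (Or.inl hxs)⟩
        · rintro ⟨⟨-, g1⟩, ⟨-, g2, gdisj⟩, -, g3⟩
          refine ⟨g1, g2, fun x hx h => ?_⟩
          rcases h with h | h
          · exact g3 x hx h
          · exact gdisj x h x hx rfl
      rw [if_congr hiff rfl rfl, List.foldl_append]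
    · rw [if_neg hrow, if_neg]
      rintro ⟨h1, h2, h3⟩
      apply hrow
      simp only [List.forall_mem_append, List.nodup_append] at h1 h2 h3
      exact ⟨h1.1, h2.1, h3.1⟩

-- A = true iff the flattened board is in-range and duplicate-free
theorem valid_board_iff (board : List (List Int)) :
    valid_board board = true ↔
      ((∀ b ∈ board.flatMap (fun r => r), 0 ≤ b ∧ b < 9) ∧ (board.flatMap (fun r => r)).Nodup) := by
  unfold valid_board
  rw [vbBoardLoop_eq]
  split
  · rename_i h
    simpa using And.intro h.1 h.2.1
  · rename_i h
    simp only [Option.isSome_none, Bool.false_eq_true, false_iff]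
    intro h'
    exact h ⟨h'.1, h'.2, by simp [PySem.Set.empty]⟩

-- the adjacent-pairs test of B is exactly Chain' (· < ·)
theorem zip_tail_all_lt : ∀ (l : List Int),
    ((l.zip l.tail).all (fun p => decide (p.1 < p.2)) = true) ↔ l.IsChain (· < ·)
  | [] => by simp
  | [a] => by simp
  | a :: b :: t => by
    have ih := zip_tail_all_lt (b :: t)
    simp only [List.tail_cons, List.zip_cons_cons, List.all_cons, Bool.and_eq_true,
      decide_eq_true_iff, List.isChain_cons_cons] at *
    tauto

theorem mem_getLastD : ∀ (l : List Int), l ≠ [] → l.getLastD 0 ∈ l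
  | [], h => absurd rfl h
  | [a], _ => by simp
  | a :: b :: t, _ => by
    have hm := mem_getLastD (b :: t) (by simp)
    have he : (a :: b :: t).getLastD 0 = (b :: t).getLastD 0 := by simp
    rw [he]
    exact List.mem_cons_of_mem a hm

theorem le_getLastD : ∀ (l : List Int), l.Pairwise (· ≤ ·) → ∀ y ∈ l, y ≤ l.getLastD 0
  | [], _, y, hy => by simp at hy
  | a :: t, hp, y, hy => by
    rcases List.pairwise_cons.mp hp with ⟨ha, ht⟩
    cases t with
    | nil => simp at hy; simp [hy]
    | cons b s =>
      have he : (a :: b :: s).getLastD 0 = (b :: s).getLastD 0 := by simp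
      rw [he]
      rcases List.mem_cons.mp hy with rfl | hyt
      · exact ha _ (mem_getLastD (b :: s) (by simp))
      · exact le_getLastD (b :: s) ht y hyt

-- B = true iff the flattened board is in-range and duplicate-free
theorem valid_board_alt_iff (board : List (List Int)) :
    valid_board_alt board = true ↔
      ((∀ b ∈ board.flatMap (fun r => r), 0 ≤ b ∧ b < 9) ∧ (board.flatMap (fun r => r)).Nodup) := by
  unfold valid_board_alt
  have hperm : (PySem.List.sorted (board.flatMap (fun row => row)) (fun x => x) false).Perm
      (board.flatMap (fun row => row)) := PySem.List.sorted_perm _ _ _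
  have hpw : (PySem.List.sorted (board.flatMap (fun row => row)) (fun x => x) false).Pairwise
      (fun a b => a ≤ b) := PySem.List.sorted_pairwise _ _
  set s := PySem.List.sorted (board.flatMap (fun row => row)) (fun x => x) false with hs
  have hmem : ∀ x, x ∈ s ↔ x ∈ board.flatMap (fun row => row) := fun x => hperm.mem_iff
  have hnd : s.Nodup ↔ (board.flatMap (fun row => row)).Nodup := hperm.nodup_iff
  cases hse : s with
  | nil =>
    have hflat : board.flatMap (fun row => row) = [] := by
      have := hperm; rw [hse] at this; exact this.symm.eq_nil
    simp [hflat]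
  | cons x rest =>
    rw [hse] at hmem hnd hpw
    simp only [List.isEmpty_cons, Bool.false_eq_true, if_false]
    by_cases hrange : (x :: rest).headD 0 < 0 ∨ 9 ≤ (x :: rest).getLastD 0
    · rw [if_pos (by simpa using hrange)]
      simp only [Bool.false_eq_true, false_iff]
      rintro ⟨hR, -⟩
      simp only [List.headD_cons] at hrange
      rcases hrange with h | h
      · have := hR x ((hmem x).mp (by simp)); omega
      · have hm := mem_getLastD (x :: rest) (by simp)
        have := hR _ ((hmem _).mp hm); omega
    · rw [if_neg (by simpa using hrange)]
      rw [not_or, not_lt, not_le] at hrange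
      simp only [List.headD_cons] at hrange
      rw [zip_tail_all_lt]
      constructor
      · intro hch
        have hplt : (x :: rest).Pairwise (· < ·) := List.isChain_iff_pairwise.mp hch
        have hnd' : (x :: rest).Nodup := hplt.imp (fun h => ne_of_lt h)
        refine ⟨fun b hb => ?_, hnd.mp hnd'⟩
        have hbm := (hmem b).mpr hb
        have h1 : x ≤ b := by
          rcases List.mem_cons.mp hbm with rfl | hbr
          · exact le_refl b
          · exact le_of_lt (List.rel_of_pairwise_cons hplt hbr)
        have h2 : b ≤ (x :: rest).getLastD 0 := le_getLastD _ hpw _ hbm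
        omega
      · rintro ⟨-, hnodup⟩
        have hnd' : (x :: rest).Nodup := hnd.mpr hnodup
        have hplt : (x :: rest).Pairwise (· < ·) := by
          have := hpw.and hnd'
          exact this.imp (fun h => lt_of_le_of_ne h.1 h.2)
        exact List.isChain_iff_pairwise.mpr hplt

-- ===== VERDICT =====
theorem valid_board_spec : Claim_equal_valid_board := by
  intro board _
  unfold Spec_valid_board
  rw [Bool.eq_iff_iff, valid_board_iff, valid_board_alt_iff]
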